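-- pv_equiv track=rewrite | github.com/Onisyne/ai-news-agent | main.py | make_article_preview
-- ===== SOURCE A (Python) =====
-- def make_article_preview(text, max_chars=1200):
--
--     paragraphs = text.split("\n")
--
--     result = []
--
--     total = 0
--
--     for p in paragraphs:
--
--         if total + len(p) > max_chars:
--             break
--
--         result.append(p)
--
--         total += len(p)
--
--     return "\n".join(result)
-- ===== SOURCE B (Python) =====
-- def make_article_preview(text, max_chars=1200):
--     # Prefix-sum table + binary-search cutoff instead of accumulate-and-break.
--     paragraphs = text.split("\n")
--     cums = []
--     total = 0
--     for p in paragraphs: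
--         total += len(p)
--         cums.append(total)
--     # binary search: first index whose cumulative length exceeds the budget
--     lo, hi = 0, len(cums)
--     while lo < hi:
--         mid = (lo + hi) // 2
--         if max_chars < cums[mid]:
--             hi = mid
--         else:
--             lo = mid + 1
--     return "\n".join(paragraphs[:lo])
-- ===== Notes on version B (the rewrite author's own statement) =====
-- stated objective: alternative
-- what changed: A interleaves accumulation with an early break; B first builds the cumulative-length prefix-sum table, binary-searches it for the first entry exceeding the budget, and joins that prefix slice.
import Mathlib
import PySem

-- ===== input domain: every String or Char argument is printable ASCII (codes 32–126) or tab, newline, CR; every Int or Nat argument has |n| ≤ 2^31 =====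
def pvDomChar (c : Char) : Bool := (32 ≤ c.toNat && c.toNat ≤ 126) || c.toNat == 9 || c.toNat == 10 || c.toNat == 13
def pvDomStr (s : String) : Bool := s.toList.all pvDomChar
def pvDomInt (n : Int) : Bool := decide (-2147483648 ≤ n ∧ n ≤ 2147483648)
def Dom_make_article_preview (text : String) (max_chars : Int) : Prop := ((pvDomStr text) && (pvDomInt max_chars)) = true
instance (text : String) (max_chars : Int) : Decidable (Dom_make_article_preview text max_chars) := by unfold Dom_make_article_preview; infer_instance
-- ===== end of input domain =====

-- B replaces A's accumulate-and-break loop by a prefix-sum table plus a binary-search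
-- cutoff (alternative decomposition; not claimed faster).

-- ===== PORT A =====
-- the for-loop of A: take paragraphs while the running total stays within budget, break otherwise
def pvLoopA (mc : Int) : List (List Char) → Int → List (List Char)
  | [], _ => []
  | p :: ps, total =>
    if total + (PySem.Chars.len p) > mc then []
    else p :: pvLoopA mc ps (total + PySem.Chars.len p)

def make_article_preview (text : String) (max_chars : Int) : String :=
  let paragraphs := PySem.Chars.splitOn text.toList ['\n']
  String.mk (PySem.Chars.join ['\n'] (pvLoopA max_chars paragraphs 0))

-- ===== PORT B =====
-- first loop of B: the cumulative-length table (total starts at the given accumulator)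
def pvCums : List (List Char) → Int → List Int
  | [], _ => []
  | p :: ps, total => (total + PySem.Chars.len p) :: pvCums ps (total + PySem.Chars.len p)

-- B's 'while lo < hi' binary search; cums[mid] is always in range (lo < hi ≤ len cums)
def pvBsearch (cums : List Int) (mc : Int) (lo hi : Nat) : Nat :=
  if lo < hi then
    let mid := (lo + hi) / 2
    if mc < cums.getD mid 0 then pvBsearch cums mc lo mid
    else pvBsearch cums mc (mid + 1) hi
  else lo
termination_by hi - lo
decreasing_by all_goals omega

def make_article_preview_alt (text : String) (max_chars : Int) : String :=
  let paragraphs := PySem.Chars.splitOn text.toList ['\n']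
  let cums := pvCums paragraphs 0
  let k := pvBsearch cums max_chars 0 cums.length
  String.mk (PySem.Chars.join ['\n'] (paragraphs.take k))

-- ===== PRECONDITION & SPEC =====
def Spec_make_article_preview (text : String) (max_chars : Int) (out : String) : Prop := out = make_article_preview_alt text max_chars
instance (text : String) (max_chars : Int) (out : String) : Decidable (Spec_make_article_preview text max_chars out) := by unfold Spec_make_article_preview; infer_instance

-- ===== CLAIM (what is proved, stated in full; the proofs are below) =====
def Claim_equal_make_article_preview : Prop := ∀ (text : String) (max_chars : Int), Dom_make_article_preview text max_chars → Spec_make_article_preview text max_chars (make_article_preview text max_chars)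

-- ===== LEMMAS AND PROOFS =====

-- A's loop is 'take while the cumulative sum stays ≤ mc'
theorem pvLoopA_eq_take (mc : Int) (ps : List (List Char)) (t : Int) :
    pvLoopA mc ps t = ps.take ((pvCums ps t).takeWhile (fun c => decide (c ≤ mc))).length := by
  induction ps generalizing t with
  | nil => simp [pvLoopA, pvCums]
  | cons p ps ih =>
    have hlen : PySem.Chars.len p = (p.length : Int) := by simp [PySem.Chars.len]
    by_cases h : t + (p.length : Int) ≤ mc
    · simp [pvLoopA, pvCums, h, not_lt.mpr h, ih]
    · simp [pvLoopA, pvCums, h, lt_of_not_ge h]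

theorem pvCums_le (ps : List (List Char)) (t : Int) :
    ∀ c ∈ pvCums ps t, t ≤ c := by
  induction ps generalizing t with
  | nil => simp [pvCums]
  | cons p ps ih =>
    intro c hc
    have hp : (0:Int) ≤ PySem.Chars.len p := by simp [PySem.Chars.len]
    simp only [pvCums, List.mem_cons] at hc
    rcases hc with rfl | hc
    · omega
    · have := ih (t + PySem.Chars.len p) c hc; omega

theorem pvCums_pairwise (ps : List (List Char)) (t : Int) :
    (pvCums ps t).Pairwise (· ≤ ·) := by
  induction ps generalizing t with
  | nil => simp [pvCums]
  | cons p ps ih =>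
    simp only [pvCums, List.pairwise_cons]
    exact ⟨pvCums_le ps _, ih _⟩

-- length of takeWhile from a pointwise characterisation
theorem takeWhile_length_eq (l : List Int) (p : Int → Bool) (r : Nat) (hr : r ≤ l.length)
    (h1 : ∀ i (hi : i < r), p (l[i]'(lt_of_lt_of_le hi hr)) = true)
    (h2 : ∀ hrl : r < l.length, p (l[r]'hrl) = false) :
    (l.takeWhile p).length = r := by
  induction l generalizing r with
  | nil => simpa using (hr.antisymm (Nat.zero_le r)).symm
  | cons x xs ih =>
    cases r with
    | zero =>
      have := h2 (by simp)
      simp only [List.takeWhile]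
      simp_all
    | succ r =>
      have hx := h1 0 (Nat.succ_pos r)
      simp only [List.takeWhile, List.getElem_cons_zero] at hx ⊢
      rw [hx]
      simp only [List.length_cons]
      have := ih r (by simpa using hr)
        (fun i hi => by simpa using h1 (i+1) (by omega))
        (fun hrl => by simpa using h2 (by simpa using Nat.succ_lt_succ hrl))
      omega

-- the binary search finds the first index whose value exceeds mc
theorem pvBsearch_spec (cums : List Int) (mc : Int)
    (hmono : ∀ i j, i ≤ j → j < cums.length → cums.getD i 0 ≤ cums.getD j 0) :
    ∀ lo hi, lo ≤ hi → hi ≤ cums.length →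
    (∀ i, i < lo → cums.getD i 0 ≤ mc) →
    (∀ i, hi ≤ i → i < cums.length → mc < cums.getD i 0) →
    pvBsearch cums mc lo hi ≤ cums.length ∧
      (∀ i, i < pvBsearch cums mc lo hi → cums.getD i 0 ≤ mc) ∧
      (pvBsearch cums mc lo hi < cums.length → mc < cums.getD (pvBsearch cums mc lo hi) 0) := by
  intro lo hi
  induction lo, hi using pvBsearch.induct cums mc with
  | case1 lo hi hlt mid hm ih =>
    intro hle hhi hleft hright
    rw [pvBsearch]
    simp only [if_pos hlt]
    rw [if_pos (show mc < cums.getD ((lo + hi) / 2) 0 from hm)]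
    refine ih (by omega) (by omega) hleft ?_
    intro i hmi hil
    exact lt_of_lt_of_le hm (hmono mid i hmi hil)
  | case2 lo hi hlt mid hm ih =>
    intro hle hhi hleft hright
    rw [pvBsearch]
    simp only [if_pos hlt]
    rw [if_neg (show ¬ mc < cums.getD ((lo + hi) / 2) 0 from hm)]
    refine ih (by omega) hhi ?_ hright
    intro i hi2
    have : cums.getD i 0 ≤ cums.getD mid 0 := hmono i mid (by omega) (by omega)
    omega
  | case3 lo hi hlt =>
    intro hle hhi hleft hright
    rw [pvBsearch]
    simp only [if_neg hlt]
    exact ⟨by omega, hleft, fun hl => hright lo (by omega) hl⟩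

theorem pv_main (paragraphs : List (List Char)) (mc : Int) :
    pvLoopA mc paragraphs 0 =
      paragraphs.take (pvBsearch (pvCums paragraphs 0) mc 0 (pvCums paragraphs 0).length) := by
  set cums := pvCums paragraphs 0 with hc
  have hpw := pvCums_pairwise paragraphs 0
  rw [List.pairwise_iff_getElem] at hpw
  simp only [← hc] at hpw
  have hmono : ∀ i j, i ≤ j → j < cums.length → cums.getD i 0 ≤ cums.getD j 0 := by
    intro i j hij hj
    rw [List.getD_eq_getElem cums 0 (by omega), List.getD_eq_getElem cums 0 hj]
    rcases Nat.lt_or_ge i j with h | h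
    · exact hpw i j (by omega) hj h
    · have : i = j := by omega
      subst this; rfl
  obtain ⟨h1, h2, h3⟩ := pvBsearch_spec cums mc hmono 0 cums.length (Nat.zero_le _) le_rfl
    (by omega) (by omega)
  rw [pvLoopA_eq_take, ← hc]
  congr 1
  refine takeWhile_length_eq cums _ _ h1 ?_ ?_
  · intro i hi
    have := h2 i hi
    rw [List.getD_eq_getElem cums 0 (by omega)] at this
    simpa using this
  · intro hrl
    have := h3 hrl
    rw [List.getD_eq_getElem cums 0 hrl] at this
    simpa using this

-- ===== VERDICT (by name: the statement is the Claim_ definition above) =====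
theorem make_article_preview_spec : Claim_equal_make_article_preview := by
  intro text max_chars _
  unfold Spec_make_article_preview make_article_preview make_article_preview_alt
  simp only []
  rw [pv_main]
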